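-- pv_equiv track=rewrite | github.com/o8vio/nurikabe-solver | auxfunctions.py | buscar_2x2_paredes
-- ===== SOURCE A (Python) =====
-- def calcular_dimensiones(matriz):
--     if len(matriz) == 0:
--         dimensiones = 0, 0
--     else:
--         dimensiones = len(matriz), len(matriz[0])
--     return dimensiones
--
-- def cuadrado2x2(posicion):
-- #Devuelve la lista de posiciones que forman el cuadrado
-- #cuya esquina superior izquierda es la posición dada.
--     cuadrado = [posicion]
--     cuadrado.append((posicion[0]+1,posicion[1]))
--     cuadrado.append((posicion[0],posicion[1]+1))
--     cuadrado.append((posicion[0]+1,posicion[1]+1))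
--     return cuadrado
--
-- def son_paredes(posiciones, matriz):
-- #Pre: ‘posiciones’ es una lista de posiciones válidas en ‘matriz’
--     son_paredes = True
--     i = 0
--     while i < len(posiciones) and son_paredes:
--         if matriz[posiciones[i][0]][posiciones[i][1]] != '#':
--             son_paredes = False
--         i = i + 1
--     return son_paredes
--
-- def buscar_2x2_paredes(matriz):
-- #Devuelve True si y solo si matriz contiene un cuadrado de 2x2 de paredes.
-- #Para eso, recorremos todas las posiciones que son paredes y son esquinas
-- #superiores de un cuadrado de 2x2, y nos fijamos si ese cuadrado es de paredes.
--     dimensiones = calcular_dimensiones(matriz)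
--     hay_cuadrado = False
--     fila = 0
--     while fila < dimensiones[0] - 1 and not hay_cuadrado:
--         columna = 0
--         while columna < dimensiones[1] - 1 and not hay_cuadrado:
--             if matriz[fila][columna] == '#' and son_paredes(cuadrado2x2((fila, columna)), matriz):
--                 hay_cuadrado = True
--             columna = columna + 1
--         fila = fila + 1
--     return hay_cuadrado
-- ===== SOURCE B (Python) =====
-- def buscar_2x2_paredes(matriz):
--     # Per-row integer bitmasks: bit c set iff matriz[r][c] == '#'; a 2x2 wall
--     # square exists iff some pair of consecutive row masks shares two adjacent bits.
--     if len(matriz) == 0: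
--         return False
--     w = len(matriz[0])
--     masks = []
--     for fila in matriz:
--         m = 0
--         for c in range(w):
--             if fila[c] == '#':
--                 m |= 1 << c
--         masks.append(m)
--     for r in range(len(masks) - 1):
--         both = masks[r] & masks[r + 1]
--         if both & (both << 1):
--             return True
--     return False
-- ===== Notes on version B (the rewrite author's own statement) =====
-- stated objective: alternative
-- what changed: Replaces A's cell-by-cell nested while scan (found-flag plus a per-corner helper over explicit 2x2 position lists) by per-row integer bitmasks: bit c of a row mask is set iff the cell is '#', and a 2x2 wall square exists iff for some consecutive row pair both = mask[r] & mask[r+1] satisfies both & (both << 1) != 0.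
-- outside the precondition, e.g. on buscar_2x2_paredes([['#', '#', '#'], ['#', '#']]): A returns True, B raises IndexError
import Mathlib
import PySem

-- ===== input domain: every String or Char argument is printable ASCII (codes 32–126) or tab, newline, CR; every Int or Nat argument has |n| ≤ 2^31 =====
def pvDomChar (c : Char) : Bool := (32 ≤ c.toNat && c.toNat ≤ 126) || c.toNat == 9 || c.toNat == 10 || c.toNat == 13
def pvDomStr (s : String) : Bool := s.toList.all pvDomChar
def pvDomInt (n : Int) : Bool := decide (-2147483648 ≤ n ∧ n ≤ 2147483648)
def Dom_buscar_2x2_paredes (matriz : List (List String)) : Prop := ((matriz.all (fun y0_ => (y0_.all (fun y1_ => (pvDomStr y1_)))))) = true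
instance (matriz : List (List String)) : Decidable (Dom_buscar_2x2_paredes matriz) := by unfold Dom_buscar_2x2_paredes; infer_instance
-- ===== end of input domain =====

-- B replaces A's cell-by-cell nested while scan (found-flag + per-corner helper) by per-row
-- integer bitmasks: a 2x2 wall square exists iff two consecutive row masks share two adjacent bits.

-- ===== PORT A =====

-- matriz[f][c]; out-of-range reads Python would raise on are excluded by Pre_ below.
def pyCell (m : List (List String)) (f c : Int) : String :=
  Option.getD (PySem.List.pyGet? (Option.getD (PySem.List.pyGet? m f) []) c) ""

def calcular_dimensiones (m : List (List String)) : Int × Int :=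
  if m.length = 0 then (0, 0)
  else ((m.length : Int), ((Option.getD (PySem.List.pyGet? m 0) []).length : Int))

def cuadrado2x2 (p : Int × Int) : List (Int × Int) :=
  [p, (p.1 + 1, p.2), (p.1, p.2 + 1), (p.1 + 1, p.2 + 1)]

-- while i < len(posiciones) and son_paredes: …  — a fold over the positions carrying the flag
-- (once the flag is False the remaining steps leave it unchanged, exactly like the early exit)
def son_paredes (pos : List (Int × Int)) (m : List (List String)) : Bool :=
  pos.foldl
    (fun sp p => if sp = true then (if pyCell m p.1 p.2 ≠ "#" then false else sp) else sp)
    true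

-- while columna < dimensiones[1] - 1 and not hay_cuadrado: …
def buscar_inner (m : List (List String)) (w : Int) (fila : Int) : Bool :=
  (PySem.List.pyRange 0 (w - 1) 1).foldl
    (fun hay columna =>
      if hay = false then
        (if pyCell m fila columna = "#" ∧
            son_paredes (cuadrado2x2 (fila, columna)) m = true then true else hay)
      else hay)
    false

-- while fila < dimensiones[0] - 1 and not hay_cuadrado: …
def buscar_2x2_paredes (matriz : List (List String)) : Bool :=
  let d := calcular_dimensiones matriz
  (PySem.List.pyRange 0 (d.1 - 1) 1).foldl
    (fun hay fila => if hay = false then buscar_inner matriz d.2 fila else hay)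
    false

-- ===== PORT B =====

-- inner mask-building loop: for c in range(w): if fila[c] == '#': m |= 1 << c
-- (fila[c] is in range on every admitted input; getD "" marks the out-of-range reads Pre_ excludes)
def maskOf (fila : List String) (w : Nat) : Nat :=
  (List.range w).foldl (fun m c => if fila.getD c "" = "#" then m ||| (1 <<< c) else m) 0

def buscar_2x2_paredes_alt (matriz : List (List String)) : Bool :=
  if matriz.length = 0 then false
  else
    let w := matriz.headI.length   -- len(matriz[0]) of the nonempty list
    let masks := matriz.map (fun fila => maskOf fila w)
    (List.range (masks.length - 1)).any (fun r =>
      decide (((masks.getD r 0 &&& masks.getD (r + 1) 0) &&&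
               ((masks.getD r 0 &&& masks.getD (r + 1) 0) <<< 1)) ≠ 0))

-- ===== PRECONDITION & SPEC =====
-- Pre_ excludes grids in which some row is shorter than the first row: B's mask building always
-- raises IndexError there, and A itself can raise mid-scan or only return by the accident of an
-- early '#' short-circuit (A reads no cell past column len(matriz[0])-1, so wider rows are fine).
def Pre_buscar_2x2_paredes (matriz : List (List String)) : Prop :=
  ∀ r ∈ matriz, matriz.headI.length ≤ r.length
instance (matriz : List (List String)) : Decidable (Pre_buscar_2x2_paredes matriz) := by
  unfold Pre_buscar_2x2_paredes; infer_instance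

def pvWitness_buscar_2x2_paredes : List (List String) := [["#", "#"], ["#", "#"]]

def Spec_buscar_2x2_paredes (matriz : List (List String)) (out : Bool) : Prop := out = buscar_2x2_paredes_alt matriz
instance (matriz : List (List String)) (out : Bool) : Decidable (Spec_buscar_2x2_paredes matriz out) := by unfold Spec_buscar_2x2_paredes; infer_instance

-- ===== CLAIM (what is proved, stated in full; the proofs are below) =====
def Claim_equal_buscar_2x2_paredes : Prop := ∀ (matriz : List (List String)), Dom_buscar_2x2_paredes matriz → Pre_buscar_2x2_paredes matriz → Spec_buscar_2x2_paredes matriz (buscar_2x2_paredes matriz)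

-- ===== LEMMAS AND PROOFS =====

-- the 2x2-square test at top-left (f, c), as A computes it cell by cell
def sqhit (m : List (List String)) (f c : Nat) : Bool :=
  (pyCell m (f : Int) (c : Int) == "#") && (pyCell m ((f : Int) + 1) (c : Int) == "#") &&
  (pyCell m (f : Int) ((c : Int) + 1) == "#") && (pyCell m ((f : Int) + 1) ((c : Int) + 1) == "#")

theorem son_cuadrado (m : List (List String)) (f c : Int) :
    son_paredes (cuadrado2x2 (f, c)) m =
      ((pyCell m f c == "#") && (pyCell m (f + 1) c == "#") &&
       (pyCell m f (c + 1) == "#") && (pyCell m (f + 1) (c + 1) == "#")) := by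
  by_cases h1 : pyCell m f c = "#" <;>
    by_cases h2 : pyCell m (f + 1) c = "#" <;>
      by_cases h3 : pyCell m f (c + 1) = "#" <;>
        by_cases h4 : pyCell m (f + 1) (c + 1) = "#" <;>
          simp [son_paredes, cuadrado2x2, h1, h2, h3, h4]

-- a found-flag fold is an 'any'
theorem foldl_flag (g : Int → Bool) :
    ∀ (l : List Int) (b : Bool),
      l.foldl (fun hay x => if hay = false then g x else hay) b = (b || l.any g) := by
  intro l
  induction l with
  | nil => intro b; simp
  | cons a t ih =>
    intro b
    cases b with
    | false => simp [List.foldl_cons, ih]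
    | true =>
      simp only [List.foldl_cons]
      rw [if_neg (by simp), ih]
      simp

theorem inner_any (m : List (List String)) (w : Int) (fila : Int) :
    buscar_inner m w fila =
      (PySem.List.pyRange 0 (w - 1) 1).any (fun c =>
        decide (pyCell m fila c = "#" ∧ son_paredes (cuadrado2x2 (fila, c)) m = true)) := by
  unfold buscar_inner
  have hbody : (fun (hay : Bool) (columna : Int) =>
      if hay = false then
        (if pyCell m fila columna = "#" ∧
            son_paredes (cuadrado2x2 (fila, columna)) m = true then true else hay)
      else hay) =
      (fun (hay : Bool) (columna : Int) =>
        if hay = false then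
          decide (pyCell m fila columna = "#" ∧ son_paredes (cuadrado2x2 (fila, columna)) m = true)
        else hay) := by
    funext hay columna
    by_cases hhay : hay = false
    · rw [if_pos hhay, if_pos hhay]
      subst hhay
      by_cases hc : pyCell m fila columna = "#" ∧ son_paredes (cuadrado2x2 (fila, columna)) m = true
      · simp [hc]
      · simp [hc]
    · rw [if_neg hhay, if_neg hhay]
  rw [hbody, foldl_flag]
  simp

theorem outer_any (m : List (List String)) (rows w : Int) :
    (PySem.List.pyRange 0 (rows - 1) 1).foldl
        (fun hay fila => if hay = false then buscar_inner m w fila else hay) false =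
      (PySem.List.pyRange 0 (rows - 1) 1).any (fun fila => buscar_inner m w fila) := by
  rw [foldl_flag]
  simp

theorem A_iff (m : List (List String)) :
    buscar_2x2_paredes m = true ↔
      ∃ f c : Nat, (f : Int) < (m.length : Int) - 1 ∧
        (c : Int) < (m.headI.length : Int) - 1 ∧ sqhit m f c = true := by
  have hd : calcular_dimensiones m = ((m.length : Int), (m.headI.length : Int)) := by
    cases m with
    | nil => simp [calcular_dimensiones]
    | cons a t => simp [calcular_dimensiones, PySem.List.pyGet?, PySem.List.pyIdx?]
  show buscar_2x2_paredes m = true ↔ _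
  unfold buscar_2x2_paredes
  rw [hd]
  simp only
  rw [outer_any, List.any_eq_true]
  constructor
  · rintro ⟨f, hf, hinner⟩
    rw [PySem.List.mem_pyRange_one] at hf
    rw [inner_any, List.any_eq_true] at hinner
    obtain ⟨c, hc, hcond⟩ := hinner
    rw [PySem.List.mem_pyRange_one] at hc
    rw [decide_eq_true_eq] at hcond
    have hson := hcond.2
    rw [son_cuadrado] at hson
    simp only [Bool.and_eq_true, beq_iff_eq] at hson
    refine ⟨f.toNat, c.toNat, ?_, ?_, ?_⟩
    · omega
    · omega
    · have hfc : (f.toNat : Int) = f := Int.toNat_of_nonneg hf.1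
      have hcc : (c.toNat : Int) = c := Int.toNat_of_nonneg hc.1
      simp only [sqhit, hfc, hcc, Bool.and_eq_true, beq_iff_eq]
      exact ⟨⟨⟨hson.1.1.1, hson.1.1.2⟩, hson.1.2⟩, hson.2⟩
  · rintro ⟨f, c, hf, hc, hsq⟩
    simp only [sqhit, Bool.and_eq_true, beq_iff_eq] at hsq
    refine ⟨(f : Int), ?_, ?_⟩
    · rw [PySem.List.mem_pyRange_one]
      constructor
      · omega
      · omega
    · rw [inner_any, List.any_eq_true]
      refine ⟨(c : Int), ?_, ?_⟩
      · rw [PySem.List.mem_pyRange_one]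
        constructor
        · omega
        · omega
      · rw [decide_eq_true_eq]
        refine ⟨hsq.1.1.1, ?_⟩
        rw [son_cuadrado]
        simp [hsq.1.1.1, hsq.1.1.2, hsq.1.2, hsq.2]

theorem pyCell_nat (m : List (List String)) (f c : Nat) :
    pyCell m (f : Int) (c : Int) = ((m[f]?.getD [])[c]?.getD "") := by
  simp [pyCell, PySem.List.pyGet?_natCast]

-- bit k of the literal 1
theorem testBit_one_aux (k : Nat) : Nat.testBit 1 k = decide (k = 0) := by
  cases k with
  | zero => rfl
  | succ k =>
    have hlt : (1 : Nat) < 2 ^ (k + 1) := by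
      have : 2 ^ 1 ≤ 2 ^ (k + 1) := Nat.pow_le_pow_right (by omega) (by omega)
      omega
    simp [Nat.testBit_eq_false_of_lt hlt]

-- B-side: bit i of a row mask ↔ i < w and cell i is '#'
theorem testBit_maskOf (fila : List String) (w i : Nat) :
    (maskOf fila w).testBit i = (decide (i < w) && decide (fila.getD i "" = "#")) := by
  induction w with
  | zero => simp [maskOf]
  | succ w ih =>
    unfold maskOf at *
    rw [List.range_succ, List.foldl_append]
    simp only [List.foldl_cons, List.foldl_nil]
    by_cases h : fila.getD w "" = "#"
    · rw [if_pos h, Nat.testBit_or, ih, Nat.testBit_shiftLeft]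
      have h' : fila[w]?.getD "" = "#" := by
        rw [← List.getD_eq_getElem?_getD]; exact h
      by_cases hiw : i = w
      · subst hiw
        simp [h']
      · rcases Nat.lt_or_ge i w with hlt | hge
        · simp [hlt, Nat.lt_succ_of_lt hlt, show ¬ w ≤ i by omega]
        · have h1 : ¬ i < w := by omega
          have h2 : ¬ i < w + 1 := by omega
          have h3 : w ≤ i := hge
          have h4 : ¬ (i - w = 0) := by omega
          simp [h1, h2, h3, h4, testBit_one_aux]
    · rw [if_neg h, ih]
      by_cases hiw : i = w
      · subst hiw
        have h' : ¬ fila[i]?.getD "" = "#" := by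
          rw [← List.getD_eq_getElem?_getD]; exact h
        simp [h']
      · rcases Nat.lt_or_ge i w with hlt | hge
        · simp [hlt, Nat.lt_succ_of_lt hlt]
        · have h1 : ¬ i < w := by omega
          have h2 : ¬ i < w + 1 := by omega
          simp [h1, h2]

theorem ne_zero_iff_testBit (b : Nat) : b ≠ 0 ↔ ∃ i, b.testBit i = true := by
  constructor
  · intro h
    by_contra hc
    simp only [not_exists] at hc
    refine h (Nat.zero_of_testBit_eq_false (fun i => ?_))
    cases hb : b.testBit i with
    | false => rfl
    | true => exact absurd hb (hc i)
  · rintro ⟨i, hi⟩ h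
    subst h
    simp [Nat.zero_testBit] at hi

theorem both_shift_iff (b : Nat) :
    (b &&& (b <<< 1)) ≠ 0 ↔ ∃ c, b.testBit c = true ∧ b.testBit (c + 1) = true := by
  rw [ne_zero_iff_testBit]
  constructor
  · rintro ⟨i, hi⟩
    rw [Nat.testBit_and, Nat.testBit_shiftLeft] at hi
    simp only [Bool.and_eq_true, decide_eq_true_eq] at hi
    obtain ⟨h1, h2, h3⟩ := hi
    refine ⟨i - 1, h3, ?_⟩
    have he : i - 1 + 1 = i := by omega
    rw [he]; exact h1
  · rintro ⟨c, h1, h2⟩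
    refine ⟨c + 1, ?_⟩
    rw [Nat.testBit_and, Nat.testBit_shiftLeft]
    simp [h1, h2]

theorem getD_map_mask (m : List (List String)) (w r : Nat) (hr : r < m.length) :
    (m.map (fun fila => maskOf fila w)).getD r 0 = maskOf (m[r]?.getD []) w := by
  rw [List.getD_eq_getElem?_getD, List.getElem?_map, List.getElem?_eq_getElem hr]
  simp

theorem B_iff (m : List (List String)) :
    buscar_2x2_paredes_alt m = true ↔
      ∃ f c : Nat, f + 1 < m.length ∧ c + 1 < m.headI.length ∧
        ((m[f]?.getD [])[c]?.getD "") = "#" ∧ ((m[f]?.getD [])[c+1]?.getD "") = "#" ∧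
        ((m[f+1]?.getD [])[c]?.getD "") = "#" ∧ ((m[f+1]?.getD [])[c+1]?.getD "") = "#" := by
  unfold buscar_2x2_paredes_alt
  by_cases hm : m.length = 0
  · rw [if_pos hm]
    simp only [Bool.false_eq_true, false_iff]
    rintro ⟨f, c, hf, -⟩
    omega
  · rw [if_neg hm]
    simp only [List.length_map]
    rw [List.any_eq_true]
    constructor
    · rintro ⟨r, hr, hb⟩
      rw [List.mem_range] at hr
      have hr1 : r + 1 < m.length := by omega
      have hr0 : r < m.length := by omega
      rw [getD_map_mask m _ r hr0, getD_map_mask m _ (r + 1) hr1,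
          decide_eq_true_eq, both_shift_iff] at hb
      obtain ⟨c, h1, h2⟩ := hb
      rw [Nat.testBit_and] at h1 h2
      simp only [Bool.and_eq_true, testBit_maskOf, decide_eq_true_eq] at h1 h2
      rw [List.getD_eq_getElem?_getD] at h1 h2
      exact ⟨r, c, hr1, h2.1.1, h1.1.2, h2.1.2, h1.2.2, h2.2.2⟩
    · rintro ⟨f, c, hf, hc, e1, e3, e2, e4⟩
      refine ⟨f, ?_, ?_⟩
      · rw [List.mem_range]; omega
      · have hf0 : f < m.length := by omega
        rw [getD_map_mask m _ f hf0, getD_map_mask m _ (f + 1) hf,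
            decide_eq_true_eq, both_shift_iff]
        refine ⟨c, ?_, ?_⟩ <;>
          · rw [Nat.testBit_and]
            simp only [Bool.and_eq_true, testBit_maskOf, decide_eq_true_eq]
            rw [List.getD_eq_getElem?_getD, List.getD_eq_getElem?_getD]
            exact ⟨⟨by omega, by assumption⟩, ⟨by omega, by assumption⟩⟩

theorem main_iff (m : List (List String)) :
    buscar_2x2_paredes m = true ↔ buscar_2x2_paredes_alt m = true := by
  rw [A_iff, B_iff]
  constructor
  · rintro ⟨f, c, hf, hc, hsq⟩
    simp only [sqhit, Bool.and_eq_true, beq_iff_eq] at hsq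
    obtain ⟨⟨⟨e1, e2⟩, e3⟩, e4⟩ := hsq
    have cast1 : ((f : Int) + 1) = ((f + 1 : Nat) : Int) := by push_cast; ring
    have cast2 : ((c : Int) + 1) = ((c + 1 : Nat) : Int) := by push_cast; ring
    rw [pyCell_nat] at e1
    rw [cast1, pyCell_nat] at e2
    rw [cast2, pyCell_nat] at e3
    rw [cast1, cast2, pyCell_nat] at e4
    exact ⟨f, c, by omega, by omega, e1, e3, e2, e4⟩
  · rintro ⟨f, c, hf, hc, e1, e3, e2, e4⟩
    refine ⟨f, c, by omega, by omega, ?_⟩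
    have cast1 : ((f : Int) + 1) = ((f + 1 : Nat) : Int) := by push_cast; ring
    have cast2 : ((c : Int) + 1) = ((c + 1 : Nat) : Int) := by push_cast; ring
    simp only [sqhit, Bool.and_eq_true, beq_iff_eq, cast1, cast2, pyCell_nat]
    exact ⟨⟨⟨e1, e2⟩, e3⟩, e4⟩

-- ===== VERDICT (by name: the statement is the Claim_ definition above) =====
theorem buscar_2x2_paredes_spec : Claim_equal_buscar_2x2_paredes := by
  intro m _ _
  unfold Spec_buscar_2x2_paredes
  have key := main_iff m
  cases hx : buscar_2x2_paredes m <;> cases hy : buscar_2x2_paredes_alt m <;> simp_all
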